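-- pv_equiv track=rewrite | github.com/JohnsonChouCrestDiving/eopi_debugger | common/convert.py | format_i2c_readout
-- ===== SOURCE A (Python) =====
-- def format_i2c_readout(start_addr, R_data):
--     text = ''
--     text += '   00 01 02 03 04 05 06 07 08 09 0A 0B 0C 0D 0E 0F\n'
--     text += '   -----------------------------------------------\n'
--     white_space = '   ' * (start_addr % 16)
--     formatted_data = white_space + \
--         ''.join('{:02X} '.format(i)for i in R_data)
--     start_msb = (start_addr // 16)
--     for i in range(0, len(formatted_data), 16*3):
--         text += (''.join('{:01X}'.format(start_msb % 16)) + 'x|'+formatted_data[i: i+48])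
--         start_msb += 1
--         text += '\n'
--     text += '   ***********************************************\n'
--     return text
-- ===== SOURCE B (Python) =====
-- def format_i2c_readout(start_addr, R_data):
--     header = ('   00 01 02 03 04 05 06 07 08 09 0A 0B 0C 0D 0E 0F\n'
--               '   -----------------------------------------------\n')
--     footer = '   ***********************************************\n'
--     cells = '   ' * (start_addr % 16) + ''.join('{:02X} '.format(b) for b in R_data)
--     # stream the characters, flushing a row whenever 48 have accumulated
--     rows, cur = [], ''
--     for ch in cells:
--         cur += ch
--         if len(cur) == 48:
--             rows.append(cur)
--             cur = ''
--     if cur: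
--         rows.append(cur)
--     msb = start_addr // 16
--     body = ''.join('{:01X}x|{}\n'.format((msb + k) % 16, row)
--                    for k, row in enumerate(rows))
--     return header + body + footer
-- ===== Notes on version B (the rewrite author's own statement) =====
-- stated objective: alternative
-- what changed: Replaces the build-a-flat-string-then-slice-48-char-windows-by-index loop (with a mutated row-label counter) with a single streaming pass that flushes a row every 48 characters and labels rows from their enumerated index.
import Mathlib
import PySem

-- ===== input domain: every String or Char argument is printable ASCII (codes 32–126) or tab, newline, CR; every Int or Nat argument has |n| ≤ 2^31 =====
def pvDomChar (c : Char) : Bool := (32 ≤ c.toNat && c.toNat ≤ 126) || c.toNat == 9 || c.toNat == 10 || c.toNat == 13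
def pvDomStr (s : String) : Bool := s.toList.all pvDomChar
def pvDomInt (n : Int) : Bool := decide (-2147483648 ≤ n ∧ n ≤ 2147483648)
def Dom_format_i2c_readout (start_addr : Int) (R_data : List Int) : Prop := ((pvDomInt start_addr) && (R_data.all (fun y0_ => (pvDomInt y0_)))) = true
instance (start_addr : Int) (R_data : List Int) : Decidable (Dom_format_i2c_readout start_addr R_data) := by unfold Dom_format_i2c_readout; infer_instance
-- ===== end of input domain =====

-- B replaces A's flat-string-plus-48-char-index-slicing loop by a single streaming
-- pass that flushes a row every 48 characters and labels rows from their enumerated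
-- index (objective: alternative decomposition, same cost).


-- shared formatting helpers: both Pythons use the same '{:02X} ' / '{:01X}' format calls
def hexDigit (n : Nat) : Char := if n < 10 then Char.ofNat (48 + n) else Char.ofNat (55 + n)

-- uppercase hex digits of n (no sign, no padding); '{:X}'.format(n) for n ≥ 0
def hexChars (n : Nat) : List Char :=
  if _h : n < 16 then [hexDigit n]
  else hexChars (n / 16) ++ [hexDigit (n % 16)]
decreasing_by exact Nat.div_lt_self (by omega) (by omega)

-- '{:02X}'.format(n): zero-fill AFTER the sign to total width 2
def fmt02X (n : Int) : List Char :=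
  if n < 0 then
    '-' :: (List.replicate (1 - (hexChars n.natAbs).length) '0' ++ hexChars n.natAbs)
  else
    List.replicate (2 - (hexChars n.toNat).length) '0' ++ hexChars n.toNat

-- '{:01X}'.format(n): width 1, i.e. just the digits (sign first if negative)
def fmt01X (n : Int) : List Char :=
  if n < 0 then '-' :: hexChars n.natAbs else hexChars n.toNat

def i2cHeader : List Char :=
  "   00 01 02 03 04 05 06 07 08 09 0A 0B 0C 0D 0E 0F\n".toList
def i2cRule : List Char :=
  "   -----------------------------------------------\n".toList
def i2cFooter : List Char :=
  "   ***********************************************\n".toList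

-- ===== PORT A =====
def format_i2c_readout (start_addr : Int) (R_data : List Int) : String :=
  let text : List Char := []
  let text := text ++ i2cHeader
  let text := text ++ i2cRule
  let white_space := (List.replicate (PySem.Int.mod start_addr 16).toNat "   ".toList).flatten
  let formatted_data := white_space ++ (R_data.map (fun i => fmt02X i ++ [' '])).flatten
  let start_msb := PySem.Int.floordiv start_addr 16
  let res := (PySem.List.pyRange 0 (PySem.List.len formatted_data) (16*3)).foldl
    (fun s i =>
      (s.1 ++ fmt01X (PySem.Int.mod s.2 16) ++ ['x', '|']
          ++ PySem.List.slice formatted_data (some i) (some (i + 48)) ++ ['\n'],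
       s.2 + 1))
    (text, start_msb)
  String.ofList (res.1 ++ i2cFooter)

-- ===== PORT B =====
def format_i2c_readout_alt (start_addr : Int) (R_data : List Int) : String :=
  let cells := (List.replicate (PySem.Int.mod start_addr 16).toNat "   ".toList).flatten
      ++ (R_data.map (fun b => fmt02X b ++ [' '])).flatten
  let st := cells.foldl
    (fun (s : List (List Char) × List Char) ch =>
      let cur := s.2 ++ [ch]
      if cur.length = 48 then (s.1 ++ [cur], ([] : List Char)) else (s.1, cur))
    ([], [])
  let rows := st.1 ++ (if st.2 = [] then [] else [st.2])
  let msb := PySem.Int.floordiv start_addr 16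
  let body := ((PySem.List.enumerate rows).map
      (fun kr => fmt01X (PySem.Int.mod (msb + kr.1) 16) ++ ['x', '|'] ++ kr.2 ++ ['\n'])).flatten
  String.ofList (i2cHeader ++ i2cRule ++ body ++ i2cFooter)

-- ===== PRECONDITION & SPEC =====
def Spec_format_i2c_readout (start_addr : Int) (R_data : List Int) (out : String) : Prop := out = format_i2c_readout_alt start_addr R_data
instance (start_addr : Int) (R_data : List Int) (out : String) : Decidable (Spec_format_i2c_readout start_addr R_data out) := by unfold Spec_format_i2c_readout; infer_instance

-- ===== CLAIM (what is proved, stated in full; the proofs are below) =====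
def Claim_equal_format_i2c_readout : Prop := ∀ (start_addr : Int) (R_data : List Int), Dom_format_i2c_readout start_addr R_data → Spec_format_i2c_readout start_addr R_data (format_i2c_readout start_addr R_data)

-- ===== LEMMAS AND PROOFS =====

-- the common reading of the table body: the 48-char chunks of cs, one line each
def body48 (cs : List Char) (m : Int) : List Char :=
  if _h : cs = [] then []
  else fmt01X (PySem.Int.mod m 16) ++ ['x', '|'] ++ cs.take 48 ++ '\n' :: body48 (cs.drop 48) (m + 1)
termination_by cs.length
decreasing_by
  have hpos : 0 < cs.length := List.length_pos_of_ne_nil _h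
  simp [List.length_drop]; omega

theorem pyRange48_nil {a b : Int} (h : b ≤ a) : PySem.List.pyRange a b 48 = [] := by
  rw [PySem.List.pyRange_of_pos a b (by norm_num)]
  simp [if_neg (by omega : ¬ a < b)]

theorem pyRange48_cons {a b : Int} (h : a < b) :
    PySem.List.pyRange a b 48 = a :: PySem.List.pyRange (a + 48) b 48 := by
  rw [PySem.List.pyRange_of_pos a b (by norm_num),
      PySem.List.pyRange_of_pos (a + 48) b (by norm_num)]
  by_cases h2 : a + 48 < b
  · rw [if_pos h, if_pos h2]
    have hcnt : ((b - a + 48 - 1) / 48).toNat = ((b - (a + 48) + 48 - 1) / 48).toNat + 1 := by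
      omega
    rw [hcnt, List.range_succ_eq_map, List.map_cons, List.map_map]
    refine congrArg₂ _ (by push_cast; ring) ?_
    exact List.map_congr_left (fun k _ => by simp only [Function.comp]; push_cast; ring)
  · rw [if_pos h, if_neg h2]
    have hcnt : ((b - a + 48 - 1) / 48).toNat = 1 := by omega
    rw [hcnt]
    norm_num [List.range_one]

-- B side: the streaming fold produces exactly the 48-char chunks
def chunks48 (cs : List Char) : List (List Char) :=
  if _h : cs = [] then [] else cs.take 48 :: chunks48 (cs.drop 48)
termination_by cs.length
decreasing_by
  have hpos : 0 < cs.length := List.length_pos_of_ne_nil _h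
  simp [List.length_drop]; omega

def streamStep (s : List (List Char) × List Char) (ch : Char) : List (List Char) × List Char :=
  let cur := s.2 ++ [ch]
  if cur.length = 48 then (s.1 ++ [cur], ([] : List Char)) else (s.1, cur)

theorem stream_chunks : ∀ (cs : List Char) (rows : List (List Char)) (cur : List Char),
    cur.length < 48 →
    (cs.foldl streamStep (rows, cur)).1
      ++ (if (cs.foldl streamStep (rows, cur)).2 = [] then []
          else [(cs.foldl streamStep (rows, cur)).2])
    = rows ++ chunks48 (cur ++ cs) := by
  intro cs
  induction cs with
  | nil =>
    intro rows cur h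
    simp only [List.foldl_nil, List.append_nil]
    by_cases hc : cur = []
    · rw [hc, if_pos rfl, chunks48.eq_def]
      simp
    · rw [if_neg hc, chunks48.eq_def, dif_neg hc,
        List.take_of_length_le (by omega), List.drop_eq_nil_of_le (by omega),
        chunks48.eq_def]
      simp
  | cons ch cs ih =>
    intro rows cur h
    have hsplit : cur ++ ch :: cs = (cur ++ [ch]) ++ cs := by simp
    rw [List.foldl_cons, hsplit]
    by_cases h48 : (cur ++ [ch]).length = 48
    · have htake : ((cur ++ [ch]) ++ cs).take 48 = cur ++ [ch] := by
        rw [← h48]; exact List.take_left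
      have hdrop : ((cur ++ [ch]) ++ cs).drop 48 = cs := by
        rw [← h48]; exact List.drop_left
      have hch : chunks48 ((cur ++ [ch]) ++ cs) = (cur ++ [ch]) :: chunks48 cs := by
        rw [chunks48.eq_def, dif_neg (by simp), htake, hdrop]
      rw [show streamStep (rows, cur) ch = (rows ++ [cur ++ [ch]], ([] : List Char)) by
        simp only [streamStep]
        rw [if_pos h48]]
      rw [ih (rows ++ [cur ++ [ch]]) [] (by norm_num), hch]
      simp
    · rw [show streamStep (rows, cur) ch = (rows, cur ++ [ch]) by
        simp only [streamStep]
        rw [if_neg h48]]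
      have hlt : (cur ++ [ch]).length < 48 := by
        simp at h48 ⊢; omega
      exact ih rows (cur ++ [ch]) hlt

-- B side: enumerating the chunks and rendering each line is body48
theorem enum_body48 : ∀ (cs : List Char) (m s : Int),
    ((PySem.List.enumerate (chunks48 cs) s).map
        (fun kr => fmt01X (PySem.Int.mod (m + kr.1) 16) ++ ['x', '|'] ++ kr.2 ++ ['\n'])).flatten
      = body48 cs (m + s) := by
  intro cs
  induction cs using chunks48.induct with
  | case1 =>
    intro m s
    rw [chunks48.eq_def, dif_pos rfl, body48.eq_def, dif_pos rfl]
    simp [PySem.List.enumerate]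
  | case2 cs h ih =>
    intro m s
    rw [chunks48.eq_def, dif_neg h, body48.eq_def, dif_neg h, PySem.List.enumerate_cons]
    simp only [List.map_cons, List.flatten_cons]
    have ih' := ih m (s + 1)
    rw [show m + (s + 1) = m + s + 1 by ring] at ih'
    rw [ih']
    simp

-- A side: the index-slicing fold over pyRange is body48 of the dropped suffix
theorem slice_fold (cs : List Char) : ∀ (fuel d : Nat) (t : List Char) (m : Int),
    cs.length ≤ d + fuel →
    ((PySem.List.pyRange (d : Int) (PySem.List.len cs) 48).foldl
      (fun s i =>
        (s.1 ++ fmt01X (PySem.Int.mod s.2 16) ++ ['x', '|']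
            ++ PySem.List.slice cs (some i) (some (i + 48)) ++ ['\n'],
         s.2 + 1))
      (t, m)).1
    = t ++ body48 (cs.drop d) m := by
  intro fuel
  induction fuel with
  | zero =>
    intro d t m hle
    rw [pyRange48_nil (by simp [PySem.List.len_eq]; omega)]
    rw [List.drop_eq_nil_of_le (by omega), body48.eq_def]
    simp
  | succ fuel ih =>
    intro d t m hle
    by_cases hd : cs.length ≤ d
    · rw [pyRange48_nil (by simp [PySem.List.len_eq]; omega)]
      rw [List.drop_eq_nil_of_le hd, body48.eq_def]
      simp
    · rw [Nat.not_le] at hd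
      rw [pyRange48_cons (by simp [PySem.List.len_eq]; omega)]
      rw [List.foldl_cons]
      have hsl : PySem.List.slice cs (some (d : Int)) (some ((d : Int) + 48))
          = (cs.drop d).take 48 := by
        have h48 := PySem.List.slice_natCast_add (xs := cs) (j := d) (n := 48)
        push_cast at h48
        exact h48
      simp only [hsl]
      have hcast : ((d : Int) + 48) = (((d + 48 : Nat)) : Int) := by push_cast; ring
      rw [hcast,
        ih (d + 48) (t ++ fmt01X (PySem.Int.mod m 16) ++ ['x', '|'] ++ (cs.drop d).take 48 ++ ['\n'])
          (m + 1) (by omega)]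
      have hne : cs.drop d ≠ [] := by
        simp [List.drop_eq_nil_iff]; omega
      conv_rhs => rw [body48.eq_def]
      rw [dif_neg hne]
      rw [show (cs.drop d).drop 48 = cs.drop (d + 48) by
        rw [List.drop_drop]]
      simp

-- ===== VERDICT (by name: the statement is the Claim_ definition above) =====
theorem format_i2c_readout_spec : Claim_equal_format_i2c_readout := by
  intro sa rd _hdom
  unfold Spec_format_i2c_readout
  simp only [format_i2c_readout, format_i2c_readout_alt]
  rw [show (fun (s : List (List Char) × List Char) (ch : Char) =>
      let cur := s.2 ++ [ch]
      if cur.length = 48 then (s.1 ++ [cur], ([] : List Char)) else (s.1, cur)) = streamStep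
    from rfl]
  have hA := slice_fold
      ((List.replicate (PySem.Int.mod sa 16).toNat "   ".toList).flatten
        ++ (rd.map (fun i => fmt02X i ++ [' '])).flatten)
      (((List.replicate (PySem.Int.mod sa 16).toNat "   ".toList).flatten
        ++ (rd.map (fun i => fmt02X i ++ [' '])).flatten).length)
      0 ([] ++ i2cHeader ++ i2cRule) (PySem.Int.floordiv sa 16) (by omega)
  simp only [Nat.cast_zero, List.drop_zero] at hA
  have hB := stream_chunks
      ((List.replicate (PySem.Int.mod sa 16).toNat "   ".toList).flatten
        ++ (rd.map (fun b => fmt02X b ++ [' '])).flatten) [] [] (by norm_num)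
  simp only [List.nil_append] at hB
  have hE := enum_body48
      ((List.replicate (PySem.Int.mod sa 16).toNat "   ".toList).flatten
        ++ (rd.map (fun b => fmt02X b ++ [' '])).flatten)
      (PySem.Int.floordiv sa 16) 0
  simp only [add_zero] at hE
  rw [show ((16 : Int) * 3) = 48 from by norm_num, hA, hB, hE]
  simp [List.append_assoc]
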